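-- pv_equiv track=rewrite | github.com/Wulfic/Cicada3301 | Tools/th_substitution_test.py | parse_to_runes
-- ===== SOURCE A (Python) =====
-- DIGRAPHS = ['TH', 'NG', 'EA', 'AE', 'IA', 'EO', 'OE']
--
-- GEMATRIA = {
--     'F': 0, 'U': 1, 'TH': 2, 'O': 3, 'R': 4, 'C': 5, 'K': 5, 'G': 6, 'W': 7,
--     'H': 8, 'N': 9, 'I': 10, 'J': 11, 'EO': 12, 'P': 13, 'X': 14, 'S': 15,
--     'T': 16, 'B': 17, 'E': 18, 'M': 19, 'L': 20, 'NG': 21, 'ING': 21, 'D': 22,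
--     'OE': 23, 'A': 24, 'AE': 25, 'Y': 26, 'IA': 27, 'IO': 27, 'EA': 28
-- }
--
-- def parse_to_runes(text):
--     """Convert text to rune sequence with indices"""
--     text = text.upper()
--     runes = []
--     i = 0
--     while i < len(text):
--         if i < len(text) - 1:
--             digraph = text[i:i+2]
--             if digraph in DIGRAPHS:
--                 runes.append((digraph, GEMATRIA.get(digraph, -1)))
--                 i += 2
--                 continue
--         if text[i].isalpha():
--             runes.append((text[i], GEMATRIA.get(text[i], -1)))
--         i += 1
--     return runes
-- ===== SOURCE B (Python) =====
-- DIGRAPHS = ['TH', 'NG', 'EA', 'AE', 'IA', 'EO', 'OE']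
--
-- GEMATRIA = {
--     'F': 0, 'U': 1, 'TH': 2, 'O': 3, 'R': 4, 'C': 5, 'K': 5, 'G': 6, 'W': 7,
--     'H': 8, 'N': 9, 'I': 10, 'J': 11, 'EO': 12, 'P': 13, 'X': 14, 'S': 15,
--     'T': 16, 'B': 17, 'E': 18, 'M': 19, 'L': 20, 'NG': 21, 'ING': 21, 'D': 22,
--     'OE': 23, 'A': 24, 'AE': 25, 'Y': 26, 'IA': 27, 'IO': 27, 'EA': 28
-- }
--
-- def parse_to_runes(text):
--     """Convert text to rune sequence with indices (single pass, pending-char state)."""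
--     runes = []
--     prev = ''
--     for c in text.upper():
--         if prev and prev + c in DIGRAPHS:
--             runes.append((prev + c, GEMATRIA.get(prev + c, -1)))
--             prev = ''
--         else:
--             if prev.isalpha():
--                 runes.append((prev, GEMATRIA.get(prev, -1)))
--             prev = c
--     if prev.isalpha():
--         runes.append((prev, GEMATRIA.get(prev, -1)))
--     return runes
-- ===== Notes on version B (the rewrite author's own statement) =====
-- stated objective: alternative
-- what changed: Replaced A's index-based while loop with two-character lookahead and continue by a single forward pass over the characters that carries a pending-previous-character state and flushes it at the end.
import Mathlib
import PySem

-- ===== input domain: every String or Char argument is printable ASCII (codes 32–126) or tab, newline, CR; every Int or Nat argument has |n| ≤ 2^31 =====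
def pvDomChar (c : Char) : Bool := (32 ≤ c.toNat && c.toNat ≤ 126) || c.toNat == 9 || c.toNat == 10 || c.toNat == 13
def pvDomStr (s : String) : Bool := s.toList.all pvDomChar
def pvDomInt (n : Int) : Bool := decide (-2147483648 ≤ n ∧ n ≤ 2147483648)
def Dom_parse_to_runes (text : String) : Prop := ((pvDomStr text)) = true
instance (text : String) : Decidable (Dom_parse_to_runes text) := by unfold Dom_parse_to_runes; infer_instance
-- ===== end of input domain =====

-- B replaces A's index/lookahead while loop by a single pass with a pending-character state (alternative decomposition, same cost).

-- ===== PORT A =====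
-- module constants shared by both versions (as in the Python module)
def pvDIGRAPHS : List String := ["TH", "NG", "EA", "AE", "IA", "EO", "OE"]

def pvGEMATRIA : PySem.Dict String Int := PySem.Dict.ofList
  [("F",0),("U",1),("TH",2),("O",3),("R",4),("C",5),("K",5),("G",6),("W",7),
   ("H",8),("N",9),("I",10),("J",11),("EO",12),("P",13),("X",14),("S",15),
   ("T",16),("B",17),("E",18),("M",19),("L",20),("NG",21),("ING",21),("D",22),
   ("OE",23),("A",24),("AE",25),("Y",26),("IA",27),("IO",27),("EA",28)]

-- A's while loop over index i, as the obvious structural recursion on the suffix at i: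
-- 'i < len(text) - 1' = at least two chars remain; text[i:i+2] = the first two chars.
def parse_to_runes_go : List Char → List (String × Int)
  | [] => []
  | [c] =>
      if PySem.Chars.isalpha c then
        [(String.ofList [c], pvGEMATRIA.getD (String.ofList [c]) (-1))]
      else []
  | c :: c2 :: rest =>
      let digraph := String.ofList [c, c2]
      if pvDIGRAPHS.contains digraph then
        (digraph, pvGEMATRIA.getD digraph (-1)) :: parse_to_runes_go rest
      else if PySem.Chars.isalpha c then
        (String.ofList [c], pvGEMATRIA.getD (String.ofList [c]) (-1)) :: parse_to_runes_go (c2 :: rest)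
      else
        parse_to_runes_go (c2 :: rest)

def parse_to_runes (text : String) : List (String × Int) :=
  parse_to_runes_go (PySem.Chars.upper text.toList)

-- ===== PORT B =====
-- state = (runes so far, pending previous char); 'prev = '' ' ports as none
def parse_to_runes_step (st : List (String × Int) × Option Char) (c : Char) :
    List (String × Int) × Option Char :=
  match st.2 with
  | some p =>
      let dg := String.ofList [p, c]
      if pvDIGRAPHS.contains dg then
        (st.1 ++ [(dg, pvGEMATRIA.getD dg (-1))], none)
      else if PySem.Chars.isalpha p then
        (st.1 ++ [(String.ofList [p], pvGEMATRIA.getD (String.ofList [p]) (-1))], some c)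
      else
        (st.1, some c)
  | none => (st.1, some c)

-- final 'if prev.isalpha(): append'
def parse_to_runes_flush : Option Char → List (String × Int)
  | some p =>
      if PySem.Chars.isalpha p then
        [(String.ofList [p], pvGEMATRIA.getD (String.ofList [p]) (-1))]
      else []
  | none => []

def parse_to_runes_alt (text : String) : List (String × Int) :=
  let st := (PySem.Chars.upper text.toList).foldl parse_to_runes_step ([], none)
  st.1 ++ parse_to_runes_flush st.2

-- ===== PRECONDITION & SPEC =====
def Spec_parse_to_runes (text : String) (out : List (String × Int)) : Prop := out = parse_to_runes_alt text
instance (text : String) (out : List (String × Int)) : Decidable (Spec_parse_to_runes text out) := by unfold Spec_parse_to_runes; infer_instance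

-- ===== CLAIM (what is proved, stated in full; the proofs are below) =====
def Claim_equal_parse_to_runes : Prop := ∀ (text : String), Dom_parse_to_runes text → Spec_parse_to_runes text (parse_to_runes text)

-- ===== LEMMAS AND PROOFS =====

-- B's pending-state pass, written as a recursion (proof-side model of the fold)
def pvF : Option Char → List Char → List (String × Int)
  | p, [] => parse_to_runes_flush p
  | none, c :: r => pvF (some c) r
  | some p, c :: r =>
      let dg := String.ofList [p, c]
      if pvDIGRAPHS.contains dg then
        (dg, pvGEMATRIA.getD dg (-1)) :: pvF none r
      else
        parse_to_runes_flush (some p) ++ pvF (some c) r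

lemma pvFold_eq_pvF (l : List Char) : ∀ (acc : List (String × Int)) (p : Option Char),
    (l.foldl parse_to_runes_step (acc, p)).1 ++
      parse_to_runes_flush (l.foldl parse_to_runes_step (acc, p)).2 = acc ++ pvF p l := by
  induction l with
  | nil => intro acc p; simp [pvF]
  | cons c r ih =>
    intro acc p
    cases p with
    | none =>
      simp only [List.foldl_cons, parse_to_runes_step, pvF]
      exact ih acc (some c)
    | some p =>
      simp only [List.foldl_cons, parse_to_runes_step, pvF]
      split_ifs with h1 h2
      · rw [ih]; simp
      · rw [ih]; simp [parse_to_runes_flush, h2]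
      · rw [ih]; simp [parse_to_runes_flush, h2]

lemma pvF_eq_goA (l : List Char) :
    pvF none l = parse_to_runes_go l ∧
      ∀ c, pvF (some c) l = parse_to_runes_go (c :: l) := by
  induction l with
  | nil =>
    refine ⟨rfl, fun c => ?_⟩
    simp [pvF, parse_to_runes_flush, parse_to_runes_go]
  | cons d r ih =>
    refine ⟨?_, fun c => ?_⟩
    · show pvF (some d) r = _
      exact ih.2 d
    · simp only [pvF, parse_to_runes_go, ih.1, ih.2 d]
      by_cases h1 : String.ofList [c, d] ∈ pvDIGRAPHS
      · simp [h1]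
      · by_cases h2 : PySem.Chars.isalpha c = true <;>
          simp [h1, parse_to_runes_flush, h2]

-- ===== VERDICT (by name: the statement is the Claim_ definition above) =====
theorem parse_to_runes_spec : Claim_equal_parse_to_runes := by
  intro text _
  unfold Spec_parse_to_runes parse_to_runes parse_to_runes_alt
  rw [show ((PySem.Chars.upper text.toList).foldl parse_to_runes_step ([], none)).1 ++
        parse_to_runes_flush ((PySem.Chars.upper text.toList).foldl parse_to_runes_step ([], none)).2 =
        [] ++ pvF none (PySem.Chars.upper text.toList) from pvFold_eq_pvF _ [] none]
  rw [(pvF_eq_goA _).1]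
  rfl
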